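-- pv_equiv track=rewrite | github.com/cmbi/kmad-web | kman_web/services/convert.py | encode_ptms
-- ===== SOURCE A (Python) =====
-- def encode_ptms(seq, ptms):
--     code_table = [["Z", "a", "b", "c"],  # code table for PTMs
--                   ["V", "W", "X", "Y"],
--                   ["R", "S", "T", "U"],
--                   ["J", "K", "L", "M"],
--                   ["F", "G", "H", "I"],
--                   ["B", "C", "D", "E"],
--                   ["N", "O", "P", "Q"]]
--     for i, ptmI in enumerate(ptms):
--         for j, ptmModeJ in enumerate(ptmI):
--             if ptmModeJ:
--                 k = 0
--                 l = 0
--                 end = max(ptmModeJ)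
--                 while k < end + 1 and l < len(seq):
--                     if l % 7 == 4 and k in ptmModeJ:
--                         seq[l] = code_table[i][j]
--                     if l % 7 == 0 and seq[l] != "-":
--                         k += 1
--                     l += 1
--     return seq
-- ===== SOURCE B (Python) =====
-- def encode_ptms(seq, ptms):
--     code_table = [["Z", "a", "b", "c"],  # code table for PTMs
--                   ["V", "W", "X", "Y"],
--                   ["R", "S", "T", "U"],
--                   ["J", "K", "L", "M"],
--                   ["F", "G", "H", "I"],
--                   ["B", "C", "D", "E"],
--                   ["N", "O", "P", "Q"]]
--     # one pass: collect the writable slots (l % 7 == 4) together with the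
--     # residue count k active at each slot; k counts non-gap residues seen at
--     # l % 7 == 0 columns, which are never written, so the slots stay valid.
--     slots = []
--     k = 0
--     for l in range(len(seq)):
--         if l % 7 == 0 and seq[l] != "-":
--             k += 1
--         if l % 7 == 4:
--             slots.append((l, k))
--     for i, ptmI in enumerate(ptms):
--         for j, ptmModeJ in enumerate(ptmI):
--             if ptmModeJ:
--                 wanted = set(ptmModeJ)
--                 mx = max(ptmModeJ)
--                 for l, kv in slots:
--                     if kv > mx:
--                         break  # slot counters are non-decreasing
--                     if kv in wanted:
--                         seq[l] = code_table[i][j]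
--     return seq
-- ===== Notes on version B (the rewrite author's own statement) =====
-- stated objective: alternative
-- what changed: Instead of rescanning seq from position 0 for every non-empty PTM mode list (up to 28 scans), B makes one pass over seq collecting the writable slots (l%7==4) with their residue counter k, then each PTM entry just filters that precomputed slot list with a set lookup; seq is mutated in place in both (return value equals the mutated argument).
import Mathlib
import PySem

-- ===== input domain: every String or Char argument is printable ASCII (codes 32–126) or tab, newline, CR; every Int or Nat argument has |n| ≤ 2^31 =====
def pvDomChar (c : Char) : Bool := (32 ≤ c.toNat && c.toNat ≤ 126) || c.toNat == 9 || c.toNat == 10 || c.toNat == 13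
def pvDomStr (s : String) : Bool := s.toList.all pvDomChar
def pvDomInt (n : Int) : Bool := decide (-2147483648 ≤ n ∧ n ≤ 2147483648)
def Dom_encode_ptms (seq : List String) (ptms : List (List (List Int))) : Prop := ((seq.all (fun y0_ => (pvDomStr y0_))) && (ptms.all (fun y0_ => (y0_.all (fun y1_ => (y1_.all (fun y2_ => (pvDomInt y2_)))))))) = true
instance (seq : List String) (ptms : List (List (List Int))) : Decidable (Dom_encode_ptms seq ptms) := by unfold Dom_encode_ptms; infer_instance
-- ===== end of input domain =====

-- B replaces A's per-PTM-entry rescan of seq by one precomputed slot index (residue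
-- counter per l%7==4 slot), then small lookup passes; same in-place mutation, same result.

-- ===== PORT A =====
def pvCodeTable : List (List String) :=
  [["Z", "a", "b", "c"],
   ["V", "W", "X", "Y"],
   ["R", "S", "T", "U"],
   ["J", "K", "L", "M"],
   ["F", "G", "H", "I"],
   ["B", "C", "D", "E"],
   ["N", "O", "P", "Q"]]

-- code_table[i][j]; inside Pre_ the indices are always in range, so getD is exact
def pvCode (i j : Int) : String :=
  PySem.List.pyGetD (PySem.List.pyGetD pvCodeTable i []) j ""

-- A's while loop, fuel = remaining length bound (l increases every iteration, so
-- fuel seq.length from l = 0 never runs out before the guard l < len(seq) fails)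
def pvAloop (code : String) (ptm : List Int) (endv : Int) :
    Nat → List String → Int → Nat → List String
  | 0, seq, _, _ => seq
  | Nat.succ n, seq, k, l =>
    if k < endv + 1 ∧ l < seq.length then
      let seq1 := if l % 7 == 4 && ptm.contains k then seq.set l code else seq
      let k1 := if l % 7 == 0 && seq1.getD l "" != "-" then k + 1 else k
      pvAloop code ptm endv n seq1 k1 (l + 1)
    else seq

-- body of A's inner for-loop (one (i, j, ptmModeJ) entry)
def pvAEntry (i j : Int) (ptm : List Int) (s : List String) : List String :=
  if ptm ≠ [] then
    pvAloop (pvCode i j) ptm ((PySem.List.max? ptm (fun x => x)).getD 0) s.length s 0 0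
  else s

def encode_ptms (seq : List String) (ptms : List (List (List Int))) : List String :=
  (PySem.List.enumerate ptms 0).foldl (fun s ir =>
    (PySem.List.enumerate ir.2 0).foldl (fun s2 jp =>
      pvAEntry ir.1 jp.1 jp.2 s2) s) seq

-- ===== PORT B =====
-- B's first pass: for l in range(len(seq)): update k at l%7==0, record (l, k) at l%7==4
def pvSlotsAux (seq : List String) : Nat → Nat → Int → List (Nat × Int)
  | 0, _, _ => []
  | Nat.succ n, l, k =>
    if l < seq.length then
      let k1 := if l % 7 == 0 && seq.getD l "" != "-" then k + 1 else k
      (if l % 7 == 4 then [(l, k1)] else []) ++ pvSlotsAux seq n (l + 1) k1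
    else []

-- B's inner slot loop for one PTM entry
-- B's slot loop with the break: slot counters are non-decreasing, stop past mx
def pvWriteB (code : String) (wanted : PySem.Set Int) (mx : Int) :
    List (Nat × Int) → List String → List String
  | [], seq => seq
  | lk :: rest, seq =>
      if mx < lk.2 then seq
      else pvWriteB code wanted mx rest
        (if PySem.Set.contains wanted lk.2 then seq.set lk.1 code else seq)

def pvWriteAll (code : String) (ptm : List Int) (slots : List (Nat × Int))
    (seq : List String) : List String :=
  pvWriteB code (PySem.Set.ofList ptm) ((PySem.List.max? ptm (fun x => x)).getD 0)
    slots seq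

def pvBEntry (i j : Int) (ptm : List Int) (slots : List (Nat × Int))
    (s : List String) : List String :=
  if ptm ≠ [] then pvWriteAll (pvCode i j) ptm slots s else s

def encode_ptms_alt (seq : List String) (ptms : List (List (List Int))) : List String :=
  let slots := pvSlotsAux seq seq.length 0 0
  (PySem.List.enumerate ptms 0).foldl (fun s ir =>
    (PySem.List.enumerate ir.2 0).foldl (fun s2 jp =>
      pvBEntry ir.1 jp.1 jp.2 slots s2) s) seq

-- ===== PRECONDITION & SPEC =====
-- residue counter of A at column l: non-gap entries among positions 0,7,…,⌊l/7⌋*7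
def pvResCount (seq : List String) (l : Nat) : Int :=
  (((List.range (l + 1)).filter (fun t => t % 7 == 0 && seq.getD t "" != "-")).length : Int)

-- Pre_ excludes exactly the inputs on which A raises: an IndexError on code_table[i][j]
-- occurs iff some entry outside the 7×4 code table (i ≥ 7 or j ≥ 4) is non-empty and
-- actually hits a writable slot (l % 7 == 4 with its residue counter in the entry).
def Pre_encode_ptms (seq : List String) (ptms : List (List (List Int))) : Prop :=
  ∀ p ∈ PySem.List.enumerate ptms 0, ∀ q ∈ PySem.List.enumerate p.2 0,
    (7 ≤ p.1 ∨ 4 ≤ q.1) → ∀ l ∈ List.range seq.length, l % 7 = 4 → pvResCount seq l ∉ q.2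
instance (seq : List String) (ptms : List (List (List Int))) : Decidable (Pre_encode_ptms seq ptms) := by unfold Pre_encode_ptms; infer_instance

def pvWitness_encode_ptms : List String × List (List (List Int)) :=
  (["A", "B", "C", "D", "E"], [[[1]]])

def Spec_encode_ptms (seq : List String) (ptms : List (List (List Int))) (out : List String) : Prop := out = encode_ptms_alt seq ptms
instance (seq : List String) (ptms : List (List (List Int))) (out : List String) : Decidable (Spec_encode_ptms seq ptms out) := by unfold Spec_encode_ptms; infer_instance

-- ===== CLAIM (what is proved, stated in full; the proofs are below) =====
def Claim_equal_encode_ptms : Prop := ∀ (seq : List String) (ptms : List (List (List Int))), Dom_encode_ptms seq ptms → Pre_encode_ptms seq ptms → Spec_encode_ptms seq ptms (encode_ptms seq ptms)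

-- ===== LEMMAS AND PROOFS =====

-- proof-side version of pvWriteAll with plain list membership
def pvWriteAllL (code : String) (ptm : List Int) (slots : List (Nat × Int))
    (seq : List String) : List String :=
  slots.foldl (fun s lk => if ptm.contains lk.2 then s.set lk.1 code else s) seq

theorem pvSetContains (ptm : List Int) (k : Int) :
    PySem.Set.contains (PySem.Set.ofList ptm) k = ptm.contains k := by
  by_cases h : k ∈ ptm <;>
    simp [PySem.Set.mem_ofList, h]

-- slot counters never drop below the starting counter
theorem pvSlotsAux_snd_ge (seq : List String) :
    ∀ (n l : Nat) (k : Int) (lk : Nat × Int), lk ∈ pvSlotsAux seq n l k → k ≤ lk.2 := by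
  intro n
  induction n with
  | zero => intro l k lk h; simp [pvSlotsAux] at h
  | succ n ih =>
      intro l k lk h
      simp only [pvSlotsAux] at h
      by_cases hl : l < seq.length
      · simp only [hl, if_true, List.mem_append] at h
        have hk1 : k ≤ (if (l % 7 == 0 && seq.getD l "" != "-") = true then k + 1 else k) := by
          split <;> omega
        rcases h with h | h
        · rcases (by split at h <;> simp_all : lk = (l, (if (l % 7 == 0 && seq.getD l "" != "-") = true then k + 1 else k))) with rfl
          exact hk1
        · exact le_trans hk1 (ih _ _ _ h)
      · simp [hl] at h

theorem pvWriteAllL_nohit (code : String) (ptm : List Int) :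
    ∀ (slots : List (Nat × Int)) (seq : List String),
      (∀ lk ∈ slots, ptm.contains lk.2 = false) →
      pvWriteAllL code ptm slots seq = seq := by
  intro slots
  induction slots with
  | nil => intro seq _; rfl
  | cons hd tl ih =>
      intro seq h
      simp only [pvWriteAllL, List.foldl_cons, h hd List.mem_cons_self,
        Bool.false_eq_true, if_false]
      exact ih seq (fun lk hlk => h lk (List.mem_cons_of_mem _ hlk))

-- the break is sound: on a slot list produced by pvSlotsAux it changes nothing
theorem pvWriteAll_eq (code : String) (ptm : List Int) (m : Int)
    (hmx : (PySem.List.max? ptm (fun x => x)).getD 0 = m) (hle : ∀ x ∈ ptm, x ≤ m)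
    (s : List String) :
    ∀ (n : Nat) (l : Nat) (k : Int) (seq2 : List String),
      pvWriteAll code ptm (pvSlotsAux s n l k) seq2 =
        pvWriteAllL code ptm (pvSlotsAux s n l k) seq2 := by
  intro n
  induction n with
  | zero => intro l k seq2; rfl
  | succ n ih =>
      intro l k seq2
      simp only [pvSlotsAux]
      by_cases hl : l < s.length
      · simp only [hl, if_true]
        by_cases h4 : (l % 7 == 4) = true
        · simp only [h4, if_true, List.singleton_append]
          set k1 := (if (l % 7 == 0 && s.getD l "" != "-") = true then k + 1 else k) with hk1
          by_cases hbig : m < k1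
          · have hc : ptm.contains k1 = false := by
              by_contra hcc
              have hmem : k1 ∈ ptm := by
                have := Bool.of_not_eq_false hcc
                simpa using this
              exact absurd (hle k1 hmem) (by omega)
            have hrest : ∀ lk ∈ pvSlotsAux s n (l + 1) k1, ptm.contains lk.2 = false := by
              intro lk hlk
              have := pvSlotsAux_snd_ge s n (l + 1) k1 lk hlk
              by_contra hcc
              have hmem : lk.2 ∈ ptm := by
                have := Bool.of_not_eq_false hcc
                simpa using this
              exact absurd (hle lk.2 hmem) (by omega)
            simp only [pvWriteAll, pvWriteB, hmx, hbig, if_true, pvWriteAllL,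
              List.foldl_cons, pvSetContains, hc, Bool.false_eq_true, if_false]
            exact (pvWriteAllL_nohit code ptm _ seq2 hrest).symm
          · simp only [pvWriteAll, pvWriteB, hmx, hbig, if_false, pvSetContains]
            rw [← hmx]
            rw [show pvWriteB code (PySem.Set.ofList ptm)
                  ((PySem.List.max? ptm (fun x => x)).getD 0) (pvSlotsAux s n (l + 1) k1)
                  (if ptm.contains k1 = true then seq2.set l code else seq2) =
                pvWriteAll code ptm (pvSlotsAux s n (l + 1) k1)
                  (if ptm.contains k1 = true then seq2.set l code else seq2) from rfl,
              ih (l + 1) k1]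
            simp [pvWriteAllL]
        · simp only [h4, if_false, List.nil_append]
          exact ih (l + 1) _ seq2
      · simp [hl, pvWriteAll, pvWriteB, pvWriteAllL]

theorem pvWriteAllL_length (code : String) (ptm : List Int) (slots : List (Nat × Int))
    (seq : List String) : (pvWriteAllL code ptm slots seq).length = seq.length := by
  induction slots generalizing seq with
  | nil => rfl
  | cons hd tl ih =>
      simp only [pvWriteAllL, List.foldl_cons] at *
      rw [ih]
      split <;> simp [List.length_set]

-- writes at l%7==4 positions never change the slot index (reads are at l%7==0)
theorem pvSlotsAux_set (seq : List String) (m : Nat) (c : String) (hm : m % 7 = 4) :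
    ∀ (n l : Nat) (k : Int), pvSlotsAux (seq.set m c) n l k = pvSlotsAux seq n l k := by
  intro n
  induction n with
  | zero => intro l k; rfl
  | succ n ih =>
      intro l k
      simp only [pvSlotsAux, List.length_set]
      by_cases hl : l < seq.length
      · simp only [hl, if_true]
        by_cases h0 : l % 7 = 0
        · have hne : m ≠ l := fun h => by rw [h] at hm; omega
          have hget : (seq.set m c)[l]? = seq[l]? := List.getElem?_set_ne hne
          simp [List.getD, hget, ih]
        · have hb : (l % 7 == 0) = false := by simpa using h0
          simp [hb, ih]
      · simp [hl]

theorem pvSlotsAux_writeAll (code : String) (ptm : List Int)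
    (slots : List (Nat × Int)) (h4 : ∀ lk ∈ slots, lk.1 % 7 = 4) :
    ∀ (seq : List String) (n l : Nat) (k : Int),
      pvSlotsAux (pvWriteAllL code ptm slots seq) n l k = pvSlotsAux seq n l k := by
  induction slots with
  | nil => intro seq n l k; rfl
  | cons hd tl ih =>
      intro seq n l k
      simp only [pvWriteAllL, List.foldl_cons]
      have htl : ∀ lk ∈ tl, lk.1 % 7 = 4 := fun lk h => h4 lk (List.mem_cons_of_mem _ h)
      have hhd : hd.1 % 7 = 4 := h4 hd List.mem_cons_self
      by_cases hc : ptm.contains hd.2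
      · simp only [hc, if_true]
        rw [show (List.foldl (fun s lk => if ptm.contains lk.2 then s.set lk.1 code else s)
              (seq.set hd.1 code) tl) = pvWriteAllL code ptm tl (seq.set hd.1 code) from rfl,
            ih htl, pvSlotsAux_set seq hd.1 code hhd]
      · simp only [Bool.not_eq_true] at hc
        simp only [hc, Bool.false_eq_true, if_false]
        exact ih htl seq n l k

-- every recorded slot sits at an l%7==4 position
theorem pvSlotsAux_mod (seq : List String) :
    ∀ (n l : Nat) (k : Int) (lk : Nat × Int), lk ∈ pvSlotsAux seq n l k → lk.1 % 7 = 4 := by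
  intro n
  induction n with
  | zero => intro l k lk h; simp [pvSlotsAux] at h
  | succ n ih =>
      intro l k lk h
      simp only [pvSlotsAux] at h
      by_cases hl : l < seq.length
      · simp only [hl, if_true, List.mem_append] at h
        rcases h with h | h
        · by_cases h4 : l % 7 = 4
          · have hb : (l % 7 == 4) = true := by simpa using h4
            simp only [hb, if_true, List.mem_singleton] at h
            rw [h]; exact h4
          · have hb : (l % 7 == 4) = false := by simpa using h4
            simp [hb] at h
        · exact ih _ _ _ h
      · simp [hl] at h

-- once k exceeds every element of ptm, the remaining slots write nothing
theorem pvWriteAllL_dead (code : String) (ptm : List Int) (seq : List String) :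
    ∀ (n l : Nat) (k : Int), (∀ x ∈ ptm, x < k) →
      pvWriteAllL code ptm (pvSlotsAux seq n l k) seq = seq := by
  intro n
  induction n with
  | zero => intro l k _; rfl
  | succ n ih =>
      intro l k hk
      simp only [pvSlotsAux]
      by_cases hl : l < seq.length
      · simp only [hl, if_true]
        by_cases h4 : l % 7 = 4
        · have hb4 : (l % 7 == 4) = true := by simpa using h4
          have hb0 : (l % 7 == 0) = false := by simp; omega
          have hmem : k ∉ ptm := fun hm => absurd (hk k hm) (by omega)
          have hc : ptm.contains k = false := by simpa using hmem
          simp only [hb4, hb0, Bool.false_and, if_true, Bool.false_eq_true, if_false,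
            List.singleton_append, pvWriteAllL, List.foldl_cons, hc]
          exact ih _ _ hk
        · have hb4 : (l % 7 == 4) = false := by simpa using h4
          simp only [hb4, Bool.false_eq_true, if_false, List.nil_append]
          split
          · exact ih _ _ (fun x hx => by have := hk x hx; omega)
          · exact ih _ _ hk
      · simp [hl, pvWriteAllL]

-- MAIN: A's while loop computes exactly B's "filter the slot list" pass
theorem pvAloop_eq_writeAll (code : String) (ptm : List Int) (endv : Int)
    (hend : ∀ x ∈ ptm, x ≤ endv) :
    ∀ (n : Nat) (seq : List String) (k : Int) (l : Nat), seq.length ≤ n + l →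
      pvAloop code ptm endv n seq k l = pvWriteAllL code ptm (pvSlotsAux seq n l k) seq := by
  intro n
  induction n with
  | zero =>
      intro seq k l _
      rfl
  | succ n ih =>
      intro seq k l hn
      simp only [pvAloop, pvSlotsAux]
      by_cases hl : l < seq.length
      · by_cases hk : k < endv + 1
        · simp only [hk, hl, and_self, if_true]
          by_cases h4 : l % 7 = 4
          · have hb4 : (l % 7 == 4) = true := by simpa using h4
            have hb0 : (l % 7 == 0) = false := by simp; omega
            simp only [hb4, hb0, Bool.true_and, Bool.false_and, Bool.false_eq_true,
              if_false, if_true, List.singleton_append]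
            by_cases hc : ptm.contains k
            · have hlen : (seq.set l code).length = seq.length := List.length_set ..
              simp only [hc, if_true]
              rw [ih (seq.set l code) k (l + 1) (by omega)]
              simp only [pvWriteAllL, List.foldl_cons, hc, if_true]
              rw [pvSlotsAux_set seq l code h4]
            · simp only [Bool.not_eq_true] at hc
              simp only [hc, Bool.false_eq_true, if_false]
              rw [ih seq k (l + 1) (by omega)]
              simp only [pvWriteAllL, List.foldl_cons, hc, Bool.false_eq_true, if_false]
          · have hb4 : (l % 7 == 4) = false := by simpa using h4
            simp only [hb4, Bool.false_and, Bool.false_eq_true, if_false, List.nil_append]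
            rw [ih seq _ (l + 1) (by omega)]
        · simp only [hk, false_and, if_false]
          have hlt : ∀ x ∈ ptm, x < k := fun x hx => by have := hend x hx; omega
          have hdead := pvWriteAllL_dead code ptm seq (n + 1) l k hlt
          simp only [pvSlotsAux, hl, if_true] at hdead ⊢
          exact hdead.symm
      · simp only [hl, and_false, if_false]
        simp [pvWriteAllL]

-- one (i, j, ptm) entry: equal results and the slot index is preserved
theorem pvEntry_eq (slots0 : List (Nat × Int)) (h4 : ∀ lk ∈ slots0, lk.1 % 7 = 4)
    (i j : Int) (ptm : List Int) (s : List String)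
    (hs : pvSlotsAux s s.length 0 0 = slots0) :
    pvAEntry i j ptm s = pvBEntry i j ptm slots0 s ∧
      (pvAEntry i j ptm s).length = s.length ∧
      pvSlotsAux (pvAEntry i j ptm s) (pvAEntry i j ptm s).length 0 0 = slots0 := by
  by_cases hp : ptm = []
  · subst hp
    simp [pvAEntry, pvBEntry, hs]
  · have hmax : ∃ m, PySem.List.max? ptm (fun x => x) = some m := by
      cases hm : PySem.List.max? ptm (fun x => x) with
      | some m => exact ⟨m, rfl⟩
      | none => exact absurd (((PySem.List.max?_eq_none_iff ptm (fun x => x)).mp hm)) hp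
    obtain ⟨m, hm⟩ := hmax
    have hle : ∀ x ∈ ptm, x ≤ m := fun x hx => PySem.List.max?_isMax hm x hx
    have heq : pvAEntry i j ptm s = pvWriteAllL (pvCode i j) ptm slots0 s := by
      simp only [pvAEntry, hp, ne_eq, not_false_iff, if_true, hm, Option.getD_some]
      rw [pvAloop_eq_writeAll (pvCode i j) ptm m hle s.length s 0 0 (by omega), hs]
    have hBeq : pvWriteAll (pvCode i j) ptm slots0 s = pvWriteAllL (pvCode i j) ptm slots0 s := by
      rw [← hs]
      exact pvWriteAll_eq (pvCode i j) ptm m (by rw [hm]; rfl) hle s s.length 0 0 s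
    refine ⟨by simp [pvBEntry, hp, heq, hBeq], ?_, ?_⟩
    · rw [heq]; exact pvWriteAllL_length ..
    · rw [heq, pvWriteAllL_length, pvSlotsAux_writeAll _ _ _ h4, hs]

theorem pvInnerFold_eq (slots0 : List (Nat × Int)) (h4 : ∀ lk ∈ slots0, lk.1 % 7 = 4)
    (cols : List (Int × List Int)) (i : Int) :
    ∀ (s : List String), pvSlotsAux s s.length 0 0 = slots0 →
      cols.foldl (fun s2 jp => pvAEntry i jp.1 jp.2 s2) s =
        cols.foldl (fun s2 jp => pvBEntry i jp.1 jp.2 slots0 s2) s ∧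
      pvSlotsAux (cols.foldl (fun s2 jp => pvAEntry i jp.1 jp.2 s2) s)
        (cols.foldl (fun s2 jp => pvAEntry i jp.1 jp.2 s2) s).length 0 0 = slots0 := by
  induction cols with
  | nil => intro s hs; exact ⟨rfl, hs⟩
  | cons hd tl ih =>
      intro s hs
      obtain ⟨he, _, hinv⟩ := pvEntry_eq slots0 h4 i hd.1 hd.2 s hs
      simp only [List.foldl_cons]
      obtain ⟨h1, h2⟩ := ih (pvAEntry i hd.1 hd.2 s) hinv
      exact ⟨by rw [h1, he], h2⟩

theorem pvOuterFold_eq (slots0 : List (Nat × Int)) (h4 : ∀ lk ∈ slots0, lk.1 % 7 = 4)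
    (rows : List (Int × List (List Int))) :
    ∀ (s : List String), pvSlotsAux s s.length 0 0 = slots0 →
      rows.foldl (fun s ir => (PySem.List.enumerate ir.2 0).foldl
          (fun s2 jp => pvAEntry ir.1 jp.1 jp.2 s2) s) s =
        rows.foldl (fun s ir => (PySem.List.enumerate ir.2 0).foldl
          (fun s2 jp => pvBEntry ir.1 jp.1 jp.2 slots0 s2) s) s := by
  induction rows with
  | nil => intro s _; rfl
  | cons hd tl ih =>
      intro s hs
      simp only [List.foldl_cons]
      obtain ⟨h1, h2⟩ := pvInnerFold_eq slots0 h4 (PySem.List.enumerate hd.2 0) hd.1 s hs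
      rw [← h1]
      exact ih _ h2

-- ===== VERDICT (by name: the statement is the Claim_ definition above) =====
theorem encode_ptms_spec : Claim_equal_encode_ptms := by
  intro seq ptms _ _
  unfold Spec_encode_ptms encode_ptms encode_ptms_alt
  exact pvOuterFold_eq (pvSlotsAux seq seq.length 0 0)
    (fun lk h => pvSlotsAux_mod seq seq.length 0 0 lk h)
    (PySem.List.enumerate ptms 0) seq rfl
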